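-- pv_equiv track=rewrite | github.com/ThriledLokki983/vineyardgroupfellowship-be | monitoring/user_engagement_views.py | _generate_hourly_insights
-- ===== SOURCE A (Python) =====
-- from typing import Dict, List, Optional, Tuple
--
-- def _generate_hourly_insights(hourly_data: List[Dict]) -> List[str]:
--     """Generate insights from hourly activity patterns."""
--     insights = []
--
--     # Find peak activity times
--     peak_hour = max(hourly_data, key=lambda x: x['activity'])
--     if peak_hour['activity'] > 0:
--         insights.append(
--             f"Peak activity occurs at {peak_hour['hour']}:00 with {peak_hour['activity']} actions")
--
--     # Find quiet periods
--     quiet_hours = [h for h in hourly_data if h['activity'] == 0]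
--     if quiet_hours:
--         insights.append(
--             f"No activity during {len(quiet_hours)} hours of the day")
--
--     return insights
-- ===== SOURCE B (Python) =====
-- from typing import Dict, List, Optional, Tuple
--
-- def _generate_hourly_insights(hourly_data: List[Dict]) -> List[str]:
--     """Generate insights by ranking the hours and indexing activity frequencies."""
--     # Rank hours by activity, highest first; stable sort keeps the first
--     # maximum in front, matching max()'s tie-breaking.
--     ranked = sorted(hourly_data, key=lambda h: h['activity'], reverse=True)
--     peak = ranked[0]
--     # Frequency table of activity values; the quiet-hour count is one lookup.
--     counts = {}
--     for h in hourly_data: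
--         a = h['activity']
--         counts[a] = counts.get(a, 0) + 1
--     quiet = counts.get(0, 0)
--     insights = []
--     if peak['activity'] > 0:
--         insights.append(
--             f"Peak activity occurs at {peak['hour']}:00 with {peak['activity']} actions")
--     if quiet:
--         insights.append(
--             f"No activity during {quiet} hours of the day")
--     return insights
-- ===== Notes on version B (the rewrite author's own statement) =====
-- stated objective: alternative
-- what changed: Instead of A's max() scan and zero-activity filter comprehension, B sorts the hours by activity descending (stable, so the first maximum stays in front like max()) and takes the head as the peak, and builds a frequency table of activity values once so the quiet-hour count is a single dictionary lookup.
import Mathlib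
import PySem

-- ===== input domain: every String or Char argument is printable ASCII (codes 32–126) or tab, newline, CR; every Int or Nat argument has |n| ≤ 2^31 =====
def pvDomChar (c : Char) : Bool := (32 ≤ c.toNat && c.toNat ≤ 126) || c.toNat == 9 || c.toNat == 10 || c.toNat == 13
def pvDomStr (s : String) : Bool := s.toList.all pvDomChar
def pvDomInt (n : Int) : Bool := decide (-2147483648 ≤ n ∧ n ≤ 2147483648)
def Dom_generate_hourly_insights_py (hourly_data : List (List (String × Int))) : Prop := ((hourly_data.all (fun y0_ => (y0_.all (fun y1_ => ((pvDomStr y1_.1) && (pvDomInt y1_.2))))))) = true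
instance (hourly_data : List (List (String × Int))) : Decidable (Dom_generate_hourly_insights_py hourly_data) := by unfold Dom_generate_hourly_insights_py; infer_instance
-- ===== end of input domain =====

-- B replaces A's max() pass and zero-activity filter by a stable descending sort (head = first
-- maximum, matching max()'s tie-break) plus a frequency table of activity values looked up once;
-- a different algorithm of similar size, not claimed faster.


-- ===== PORT A =====
def generate_hourly_insights_py (hourly_data : List (List (String × Int))) : List String :=
  let insights : List String := []
  -- peak_hour = max(hourly_data, key=lambda x: x['activity'])  (empty list excluded by Pre_)
  let peak_hour := PySem.List.maxD hourly_data (fun x => PySem.Dict.getD ⟨x⟩ "activity" 0) []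
  let insights :=
    if 0 < PySem.Dict.getD ⟨peak_hour⟩ "activity" 0 then
      insights ++ ["Peak activity occurs at " ++ PySem.Int.toStr (PySem.Dict.getD ⟨peak_hour⟩ "hour" 0)
        ++ ":00 with " ++ PySem.Int.toStr (PySem.Dict.getD ⟨peak_hour⟩ "activity" 0) ++ " actions"]
    else insights
  let quiet_hours := hourly_data.filter (fun h => PySem.Dict.getD ⟨h⟩ "activity" 0 == 0)
  let insights :=
    if quiet_hours ≠ [] then
      insights ++ ["No activity during " ++ PySem.Int.toStr (quiet_hours.length : Int)
        ++ " hours of the day"]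
    else insights
  insights

-- ===== PORT B =====
def generate_hourly_insights_py_alt (hourly_data : List (List (String × Int))) : List String :=
  -- ranked = sorted(hourly_data, key=lambda h: h['activity'], reverse=True); peak = ranked[0]
  let ranked := PySem.List.sorted hourly_data (fun h => PySem.Dict.getD ⟨h⟩ "activity" 0) true
  let peak := PySem.List.pyGetD ranked 0 []   -- ranked[0] (empty list excluded by Pre_)
  -- counts = {}; for h: counts[a] = counts.get(a, 0) + 1
  let counts := hourly_data.foldl
    (fun (d : PySem.Dict Int Int) h =>
      let a := PySem.Dict.getD ⟨h⟩ "activity" 0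
      d.insert a (d.getD a 0 + 1))
    PySem.Dict.empty
  let quiet := counts.getD 0 0
  let insights : List String := []
  let insights :=
    if 0 < PySem.Dict.getD ⟨peak⟩ "activity" 0 then
      insights ++ ["Peak activity occurs at " ++ PySem.Int.toStr (PySem.Dict.getD ⟨peak⟩ "hour" 0)
        ++ ":00 with " ++ PySem.Int.toStr (PySem.Dict.getD ⟨peak⟩ "activity" 0) ++ " actions"]
    else insights
  if quiet ≠ 0 then
    insights ++ ["No activity during " ++ PySem.Int.toStr quiet ++ " hours of the day"]
  else insights

-- ===== PRECONDITION & SPEC =====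
-- The first entry of maximal 'activity' — the entry Python's max() picks (first winner on ties).
def pvPeak? (hourly_data : List (List (String × Int))) : Option (List (String × Int)) :=
  hourly_data.find? (fun h =>
    decide (∀ h' ∈ hourly_data, PySem.Dict.getD ⟨h'⟩ "activity" 0 ≤ PySem.Dict.getD ⟨h⟩ "activity" 0))

-- Pre_ excludes exactly where the Python A raises: the empty list (max() raises ValueError),
-- entries without an 'activity' key (KeyError in the max key function), and a missing 'hour' key
-- on the peak entry when its activity is positive (KeyError in the f-string).  Entries with
-- duplicate keys are also excluded: they cannot arise from a real Python dict, whose literal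
-- collapses repeated keys, so no representable input is lost.
def Pre_generate_hourly_insights_py (hourly_data : List (List (String × Int))) : Prop :=
  hourly_data ≠ [] ∧
  (∀ h ∈ hourly_data, (h.map Prod.fst).Nodup ∧ "activity" ∈ h.map Prod.fst) ∧
  (∀ p ∈ pvPeak? hourly_data, 0 < PySem.Dict.getD ⟨p⟩ "activity" 0 → "hour" ∈ p.map Prod.fst)
instance (hourly_data : List (List (String × Int))) : Decidable (Pre_generate_hourly_insights_py hourly_data) := by unfold Pre_generate_hourly_insights_py; infer_instance

def pvWitness_generate_hourly_insights_py : (List (List (String × Int))) :=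
  [[("hour", 9), ("activity", 3)], [("hour", 10), ("activity", 0)]]

def Spec_generate_hourly_insights_py (hourly_data : List (List (String × Int))) (out : List String) : Prop := out = generate_hourly_insights_py_alt hourly_data
instance (hourly_data : List (List (String × Int))) (out : List String) : Decidable (Spec_generate_hourly_insights_py hourly_data out) := by unfold Spec_generate_hourly_insights_py; infer_instance

-- ===== CLAIM (what is proved, stated in full; the proofs are below) =====
def Claim_equal_generate_hourly_insights_py : Prop := ∀ (hourly_data : List (List (String × Int))), Dom_generate_hourly_insights_py hourly_data → Pre_generate_hourly_insights_py hourly_data → Spec_generate_hourly_insights_py hourly_data (generate_hourly_insights_py hourly_data)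

-- ===== LEMMAS AND PROOFS =====

-- The head of an insertBy insertion is decided at the top of the list.
theorem pv_head?_insertBy {α : Type} (before : α → α → Bool) (x : α) (l : List α) :
    (PySem.List.insertBy before x l).head? =
      some (match l with | [] => x | y :: _ => if before x y then x else y) := by
  cases l with
  | nil => simp [PySem.List.insertBy]
  | cons y ys => by_cases hb : before x y <;> simp [PySem.List.insertBy, hb]

-- The head of the descending insertion sort is the running first-winner maximum (Python's max()).
theorem pv_head_sorted_fold {α κ : Type} [LinearOrder κ] (key : α → κ)
    (xs : List α) (acc : List α) :
    (xs.foldl (fun a x => PySem.List.insertBy (fun a b => decide (key b < key a)) x a) acc).head? =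
      xs.foldl
        (fun (o : Option α) x =>
          match o with
          | none => some x
          | some m => if key m < key x then some x else some m)
        acc.head? := by
  induction xs generalizing acc with
  | nil => rfl
  | cons x t ih =>
    simp only [List.foldl_cons]
    rw [ih]
    congr 1
    cases acc with
    | nil => rfl
    | cons y ys =>
      rw [pv_head?_insertBy]
      by_cases h : key y < key x <;> simp [h]

-- Python's max() is the head of sorted(…, reverse=True).
theorem pv_max?_eq_head_sorted {α κ : Type} [LinearOrder κ] (key : α → κ) (xs : List α) :
    PySem.List.max? xs key = (PySem.List.sorted xs key true).head? := by
  unfold PySem.List.max? PySem.List.sorted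
  simp only [if_true]
  rw [pv_head_sorted_fold key xs []]
  rfl

-- ===== VERDICT (by name: the statement is the Claim_ definition above) =====
theorem generate_hourly_insights_py_spec : Claim_equal_generate_hourly_insights_py := by
  intro hd _ hpre
  unfold Spec_generate_hourly_insights_py
  unfold generate_hourly_insights_py generate_hourly_insights_py_alt
  -- the frequency table is a Counter of the activities; its 0-entry is the zero count
  have hcounts :
      hd.foldl
        (fun (d : PySem.Dict Int Int) h =>
          let a := PySem.Dict.getD ⟨h⟩ "activity" 0
          d.insert a (d.getD a 0 + 1))
        PySem.Dict.empty
      = PySem.Dict.counter (hd.map (fun h => PySem.Dict.getD ⟨h⟩ "activity" 0)) := by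
    show hd.foldl
        (fun (d : PySem.Dict Int Int) h =>
          d.insert (PySem.Dict.getD ⟨h⟩ "activity" 0) (d.getD (PySem.Dict.getD ⟨h⟩ "activity" 0) 0 + 1))
        PySem.Dict.empty = _
    rw [← List.foldl_map (f := fun h : List (String × Int) => PySem.Dict.getD ⟨h⟩ "activity" 0)
      (g := fun (d : PySem.Dict Int Int) a => d.insert a (d.getD a 0 + 1))]
    exact PySem.Dict.foldl_insert_getD_add_one_eq_counter _
  simp only [hcounts, PySem.Dict.getD_counter]
  have hq : (hd.map (fun h => PySem.Dict.getD ⟨h⟩ "activity" 0)).count 0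
      = (hd.filter (fun h => PySem.Dict.getD ⟨h⟩ "activity" 0 == 0)).length := by
    simp [List.count_eq_countP, List.countP_map, List.countP_eq_length_filter.symm]
    rfl
  -- the peak entries coincide
  have hnil : hd ≠ [] := hpre.1
  have hpeak : PySem.List.maxD hd (fun x => PySem.Dict.getD ⟨x⟩ "activity" 0) []
      = PySem.List.pyGetD (PySem.List.sorted hd (fun h => PySem.Dict.getD ⟨h⟩ "activity" 0) true) 0 [] := by
    unfold PySem.List.maxD
    rw [pv_max?_eq_head_sorted]
    cases hs : PySem.List.sorted hd (fun h => PySem.Dict.getD ⟨h⟩ "activity" 0) true with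
    | nil => exact absurd ((PySem.List.sorted_eq_nil_iff _ _ _).1 hs) hnil
    | cons m t => simp [PySem.List.pyGetD, PySem.List.pyGet?, PySem.List.pyIdx?]
  rw [hq, ← hpeak]
  set peak := PySem.List.maxD hd (fun x => PySem.Dict.getD ⟨x⟩ "activity" 0) []
  set qlen := (hd.filter (fun h => PySem.Dict.getD ⟨h⟩ "activity" 0 == 0)).length
  have hz : ((qlen : Int) ≠ 0) ↔ (hd.filter (fun h => PySem.Dict.getD ⟨h⟩ "activity" 0 == 0) ≠ []) := by
    simp [qlen, List.length_eq_zero_iff]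
  by_cases hp : 0 < PySem.Dict.getD ⟨peak⟩ "activity" 0 <;>
    by_cases hq0 : (qlen : Int) = 0 <;>
      simp [hp, hq0, hz.symm]
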